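-- pv_equiv track=rewrite | github.com/kouqhar/codewars | 02-05-2026/sorted_array_swap.py | sort_and_swap
-- ===== SOURCE A (Python) =====
-- def sort_and_swap(arr):
--     arr.sort()
--     swapped = []
--     for i in range(len(arr)):
--         if i % 3 == 0 and i - 1 >= 0:
--             swapped.insert(i - 1, arr[i])
--         else:
--             swapped.append(arr[i])
--
--     return swapped
-- ===== SOURCE B (Python) =====
-- def sort_and_swap(arr):
--     arr.sort()
--     result = arr[:2]
--     for k in range(2, len(arr), 3):
--         chunk = arr[k:k + 3]
--         if len(chunk) >= 2:
--             chunk[0], chunk[1] = chunk[1], chunk[0]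
--         result += chunk
--     return result
-- ===== Notes on version B (the rewrite author's own statement) =====
-- stated objective: alternative
-- what changed: Replaces the per-index loop that grows the result one element at a time via positional list.insert calls by a chunked step-3 traversal: after sorting, copy the first two elements and for each following 3-chunk append it with its first two elements swapped.
import Mathlib
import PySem

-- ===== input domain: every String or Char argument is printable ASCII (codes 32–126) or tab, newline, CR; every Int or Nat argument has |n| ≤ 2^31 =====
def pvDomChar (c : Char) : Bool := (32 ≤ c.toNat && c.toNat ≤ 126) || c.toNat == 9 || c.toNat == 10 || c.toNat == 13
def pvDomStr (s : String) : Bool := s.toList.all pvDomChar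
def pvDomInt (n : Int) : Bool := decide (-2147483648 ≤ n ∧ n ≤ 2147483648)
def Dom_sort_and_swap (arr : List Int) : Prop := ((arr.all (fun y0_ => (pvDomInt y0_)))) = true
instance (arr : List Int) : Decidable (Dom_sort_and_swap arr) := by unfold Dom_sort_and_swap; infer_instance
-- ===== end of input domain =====

-- B replaces A's per-index insert loop by a chunked step-3 traversal that swaps the
-- first two elements of each 3-chunk after the first two sorted elements (objective:
-- alternative). Both Pythons sort the argument in place; the equivalence proved here
-- is about the return value (which is the same).

-- ===== PORT A =====
def sort_and_swap (arr : List Int) : List Int :=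
  let s := PySem.List.sorted arr (fun x => x) false
  (PySem.List.pyRange 0 s.length 1).foldl
    (fun swapped i =>
      if i % 3 = 0 ∧ i - 1 ≥ 0 then
        PySem.List.insert swapped (i - 1) (PySem.List.pyGetD s i 0)
      else
        swapped ++ [PySem.List.pyGetD s i 0]) []

-- ===== PORT B =====
def sort_and_swap_alt (arr : List Int) : List Int :=
  let s := PySem.List.sorted arr (fun x => x) false
  (PySem.List.pyRange 2 s.length 3).foldl
    (fun result k =>
      let chunk := PySem.List.slice s (some k) (some (k + 3))
      -- 'chunk[0], chunk[1] = chunk[1], chunk[0]': two reads, then two writes (exact)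
      let chunk := if 2 ≤ chunk.length then
          PySem.List.pySetD (PySem.List.pySetD chunk 0 (PySem.List.pyGetD chunk 1 0)) 1
            (PySem.List.pyGetD chunk 0 0)
        else chunk
      result ++ chunk)
    (s.take 2)

-- ===== PRECONDITION & SPEC =====
def Spec_sort_and_swap (arr : List Int) (out : List Int) : Prop := out = sort_and_swap_alt arr
instance (arr : List Int) (out : List Int) : Decidable (Spec_sort_and_swap arr out) := by unfold Spec_sort_and_swap; infer_instance

-- ===== CLAIM (what is proved, stated in full; the proofs are below) =====
def Claim_equal_sort_and_swap : Prop := ∀ (arr : List Int), Dom_sort_and_swap arr → Spec_sort_and_swap arr (sort_and_swap arr)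

-- ===== LEMMAS AND PROOFS =====

-- proof-side common form: swap the first two elements of each successive 3-chunk
def ssChunks : List Int → List Int
  | a :: b :: tail => b :: a :: (tail.take 1 ++ ssChunks (tail.drop 1))
  | l => l
termination_by l => l.length
decreasing_by simp; omega

theorem length_ssChunks (l : List Int) : (ssChunks l).length = l.length := by
  induction l using ssChunks.induct with
  | case1 a b tail ih =>
      cases tail with
      | nil => simp [ssChunks]
      | cons c v =>
          simp only [List.drop_succ_cons, List.drop_zero] at ih
          simp [ssChunks, ih]
  | case2 l h => cases l with
      | nil => simp [ssChunks]
      | cons a t => cases t with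
          | nil => simp [ssChunks]
          | cons b u => exact absurd rfl (h a b u)

-- appending one element to the input of ssChunks
theorem ssChunks_snoc (u : List Int) (x : Int) :
    ssChunks (u ++ [x]) =
      if u.length % 3 = 1 then
        (ssChunks u).take (u.length - 1) ++ x :: (ssChunks u).drop (u.length - 1)
      else ssChunks u ++ [x] := by
  induction u using ssChunks.induct with
  | case1 a b tail ih =>
      cases tail with
      | nil => simp [ssChunks]
      | cons c v =>
          simp only [List.drop_succ_cons, List.drop_zero] at ih
          simp only [List.cons_append, ssChunks, List.take_succ_cons, List.take_zero,
            List.drop_succ_cons, List.drop_zero, List.length_cons, List.nil_append]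
          rw [ih]
          by_cases h : v.length % 3 = 1
          · obtain ⟨j, hj⟩ : ∃ j, v.length = j + 1 := ⟨v.length - 1, by omega⟩
            have hc : (v.length + 1 + 1 + 1) % 3 = 1 := by omega
            rw [if_pos h, if_pos hc]
            have h2 : v.length + 1 + 1 + 1 - 1 = j + 1 + 1 + 1 := by omega
            have h3 : v.length - 1 = j := by omega
            rw [h2, h3]
            simp
          · have hc : ¬ (v.length + 1 + 1 + 1) % 3 = 1 := by omega
            rw [if_neg h, if_neg hc]
  | case2 u h =>
      cases u with
      | nil => simp [ssChunks]
      | cons a t =>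
          cases t with
          | nil => simp [ssChunks]
          | cons b w => exact absurd rfl (h a b w)

-- the state of A's loop after the first m iterations
def gState (s : List Int) (m : Nat) : List Int :=
  (s.take m).take 2 ++ ssChunks ((s.take m).drop 2)

theorem length_gState (s : List Int) (m : Nat) (hm : m ≤ s.length) :
    (gState s m).length = m := by
  simp [gState, length_ssChunks]
  omega

-- one snoc step of B's chunk decomposition
theorem gstep (t : List Int) (y : Int) :
    (t ++ [y]).take 2 ++ ssChunks ((t ++ [y]).drop 2) =
      if t.length % 3 = 0 ∧ 3 ≤ t.length then
        (t.take 2 ++ ssChunks (t.drop 2)).take (t.length - 1) ++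
          y :: (t.take 2 ++ ssChunks (t.drop 2)).drop (t.length - 1)
      else (t.take 2 ++ ssChunks (t.drop 2)) ++ [y] := by
  match t with
  | [] => simp [ssChunks]
  | [a] => simp [ssChunks]
  | a :: b :: u =>
      have hS : (ssChunks u).length = u.length := length_ssChunks u
      simp only [List.cons_append, List.take_succ_cons, List.take_zero,
        List.drop_succ_cons, List.drop_zero, List.length_cons, List.nil_append]
      rw [ssChunks_snoc]
      by_cases h : u.length % 3 = 1
      · obtain ⟨j, hj⟩ : ∃ j, u.length = j + 1 := ⟨u.length - 1, by omega⟩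
        have hc : (u.length + 1 + 1) % 3 = 0 ∧ 3 ≤ u.length + 1 + 1 := by omega
        rw [if_pos h, if_pos hc]
        have h2 : u.length + 1 + 1 - 1 = j + 1 + 1 := by omega
        have h3 : u.length - 1 = j := by omega
        rw [h2, h3]
        simp
      · have hc : ¬ ((u.length + 1 + 1) % 3 = 0 ∧ 3 ≤ u.length + 1 + 1) := by omega
        rw [if_neg h, if_neg hc]

theorem loop_inv (s : List Int) (m : Nat) (hm : m ≤ s.length) :
    (PySem.List.pyRange 0 (m : Int) 1).foldl
      (fun swapped i =>
        if i % 3 = 0 ∧ i - 1 ≥ 0 then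
          PySem.List.insert swapped (i - 1) (PySem.List.pyGetD s i 0)
        else
          swapped ++ [PySem.List.pyGetD s i 0]) [] = gState s m := by
  induction m with
  | zero => simp [PySem.List.pyRange_one_eq_nil, gState, ssChunks]
  | succ m ihm =>
      have hm' : m ≤ s.length := by omega
      have hms : m < s.length := by omega
      have hcast : ((m + 1 : Nat) : Int) = (m : Int) + 1 := by push_cast; ring
      rw [hcast, PySem.List.pyRange_one_succ_right (by positivity), List.foldl_append,
        ihm hm']
      simp only [List.foldl_cons, List.foldl_nil]
      have hget : PySem.List.pyGetD s (m : Int) 0 = s[m] := by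
        simp [List.getD_eq_getElem?_getD, List.getElem?_eq_getElem hms]
      have htake : s.take (m + 1) = s.take m ++ [s[m]] := by
        rw [List.take_add_one]
        simp [List.getElem?_eq_getElem hms]
      have hlent : (s.take m).length = m := by simp; omega
      have hstep := gstep (s.take m) s[m]
      rw [hlent] at hstep
      by_cases hc : (m : Int) % 3 = 0 ∧ (m : Int) - 1 ≥ 0
      · have hcn : m % 3 = 0 ∧ 3 ≤ m := by omega
        rw [if_pos hc, hget]
        rw [show ((m : Int) - 1) = ((m - 1 : Nat) : Int) by omega]
        rw [PySem.List.insert_natCast _ _ _ (by rw [length_gState s m hm']; omega)]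
        unfold gState
        rw [htake, hstep, if_pos hcn]
      · have hcn : ¬ (m % 3 = 0 ∧ 3 ≤ m) := by omega
        rw [if_neg hc, hget]
        unfold gState
        rw [htake, hstep, if_neg hcn]

theorem loops_agree (s : List Int) :
    (PySem.List.pyRange 0 (s.length : Int) 1).foldl
      (fun swapped i =>
        if i % 3 = 0 ∧ i - 1 ≥ 0 then
          PySem.List.insert swapped (i - 1) (PySem.List.pyGetD s i 0)
        else
          swapped ++ [PySem.List.pyGetD s i 0]) [] = s.take 2 ++ ssChunks (s.drop 2) := by
  rw [loop_inv s s.length le_rfl]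
  simp [gState]

theorem pyRange3_nil (a b : Int) (h : b ≤ a) : PySem.List.pyRange a b 3 = [] := by
  rw [PySem.List.pyRange_of_pos a b (by norm_num)]
  rw [if_neg (not_lt.mpr h)]
  simp

theorem pyRange3_cons (a b : Int) (h : a < b) :
    PySem.List.pyRange a b 3 = a :: PySem.List.pyRange (a + 3) b 3 := by
  rw [PySem.List.pyRange_of_pos a b (by norm_num),
    PySem.List.pyRange_of_pos (a + 3) b (by norm_num)]
  by_cases h2 : a + 3 < b
  · have hcount : ((b - a + 3 - 1) / 3).toNat = ((b - (a + 3) + 3 - 1) / 3).toNat + 1 := by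
      omega
    rw [if_pos h, if_pos h2, hcount, List.range_succ_eq_map]
    simp only [List.map_cons, List.map_map, Nat.cast_zero, mul_zero, add_zero]
    congr 1
    apply List.map_congr_left
    intro k _
    simp [Function.comp]
    ring
  · have hcount : ((b - a + 3 - 1) / 3).toNat = 1 := by omega
    rw [if_pos h, if_neg h2, hcount]
    simp

-- one swapped 3-chunk of B's loop body absorbs into ssChunks
theorem chunk_swap (d : List Int) (hd : d ≠ []) :
    (if 2 ≤ (d.take 3).length then
        PySem.List.pySetD (PySem.List.pySetD (d.take 3) 0 (PySem.List.pyGetD (d.take 3) 1 0)) 1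
          (PySem.List.pyGetD (d.take 3) 0 0)
      else d.take 3) ++ ssChunks (d.drop 3) = ssChunks d := by
  match d with
  | [x] => simp [ssChunks]
  | [x, y] =>
      norm_num [ssChunks, PySem.List.pySetD_of_nonneg, PySem.List.pyGetD_of_nonneg,
        PySem.List.pyGet?, PySem.List.pyIdx?]
  | x :: y :: z :: v =>
      norm_num [ssChunks, PySem.List.pySetD_of_nonneg, PySem.List.pyGetD_of_nonneg,
        PySem.List.pyGet?, PySem.List.pyIdx?]

theorem alt_loop (s : List Int) : ∀ (fuel j : Nat) (acc : List Int),
    s.length - j ≤ fuel →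
    (PySem.List.pyRange (j : Int) (s.length : Int) 3).foldl
      (fun result k =>
        let chunk := PySem.List.slice s (some k) (some (k + 3))
        let chunk := if 2 ≤ chunk.length then
            PySem.List.pySetD (PySem.List.pySetD chunk 0 (PySem.List.pyGetD chunk 1 0)) 1
              (PySem.List.pyGetD chunk 0 0)
          else chunk
        result ++ chunk) acc = acc ++ ssChunks (s.drop j) := by
  intro fuel
  induction fuel with
  | zero =>
      intro j acc hf
      have h : s.length ≤ j := by omega
      rw [pyRange3_nil _ _ (by exact_mod_cast h), List.drop_eq_nil_of_le h]
      simp [ssChunks]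
  | succ fuel ih =>
      intro j acc hf
      by_cases h : s.length ≤ j
      · rw [pyRange3_nil _ _ (by exact_mod_cast h), List.drop_eq_nil_of_le h]
        simp [ssChunks]
      · have hj : j < s.length := by omega
        rw [pyRange3_cons _ _ (by exact_mod_cast hj), List.foldl_cons]
        simp only
        rw [show ((j : Int) + 3) = ((j + 3 : Nat) : Int) by push_cast; ring]
        rw [PySem.List.slice_natCast, show j + 3 - j = 3 by omega]
        rw [ih (j + 3) _ (by omega)]
        rw [show s.drop (j + 3) = (s.drop j).drop 3 by rw [List.drop_drop]]
        rw [List.append_assoc]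
        congr 1
        exact chunk_swap (s.drop j) (by
          intro hnil
          rw [List.drop_eq_nil_iff] at hnil
          omega)

-- ===== VERDICT (by name: the statement is the Claim_ definition above) =====
theorem sort_and_swap_spec : Claim_equal_sort_and_swap := by
  intro arr _
  unfold Spec_sort_and_swap sort_and_swap sort_and_swap_alt
  rw [loops_agree]
  rw [show (2 : Int) = ((2 : Nat) : Int) by norm_num]
  rw [alt_loop _ (PySem.List.sorted arr (fun x => x) false).length 2 _ (by omega)]
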